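-- pv_equiv track=rewrite | github.com/MRyderOC/HackerRank-Solutions | Problem Solving/Algorithms/Strings/Funny String.py | funnyString
-- ===== SOURCE A (Python) =====
-- def funnyString(s):
--     # Write your code here
--     ord_dif_s, ord_dif_rev_s = [], []
--     n = len(s)
--     for i in range(n - 1):
--         ord_dif_s.append(abs(ord(s[i]) - ord(s[i + 1])))
--         rev_idx = n - i - 1
--         ord_dif_rev_s.append(abs(ord(s[rev_idx]) - ord(s[rev_idx - 1])))
--
--     if ord_dif_rev_s == ord_dif_s:
--         return "Funny"
--     return "Not Funny"
-- ===== SOURCE B (Python) =====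
-- def funnyString(s):
--     # Two-pointer symmetric check over the implicit difference array:
--     # no lists are built; compare the i-th diff with its mirror directly.
--     n = len(s)
--     for i in range((n - 1) // 2):
--         if abs(ord(s[i]) - ord(s[i + 1])) != abs(ord(s[n - 1 - i]) - ord(s[n - 2 - i])):
--             return "Not Funny"
--     return "Funny"
-- ===== Notes on version B (the rewrite author's own statement) =====
-- stated objective: simpler
-- what changed: Replaces building the forward and reversed difference lists and comparing them with == by an in-place two-pointer check that compares each diff with its mirror directly up to the midpoint and stops at the first mismatch.
import Mathlib
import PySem

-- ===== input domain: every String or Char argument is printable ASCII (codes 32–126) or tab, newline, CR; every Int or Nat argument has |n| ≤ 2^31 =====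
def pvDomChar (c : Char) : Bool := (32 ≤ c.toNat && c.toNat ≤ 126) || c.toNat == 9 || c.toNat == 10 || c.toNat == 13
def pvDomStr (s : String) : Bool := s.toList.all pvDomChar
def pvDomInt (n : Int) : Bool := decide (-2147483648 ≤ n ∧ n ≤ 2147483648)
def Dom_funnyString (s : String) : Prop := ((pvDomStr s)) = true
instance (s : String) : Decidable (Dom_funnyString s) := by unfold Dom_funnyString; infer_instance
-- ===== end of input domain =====

-- B changes the decomposition: a two-pointer symmetric check over the implicit
-- difference array (first mismatch wins), instead of building two lists and
-- comparing them; same O(n) cost, no intermediate lists.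

-- ord(c) for the ASCII domain
def pvOrd (c : Char) : Int := (c.toNat : Int)

-- ===== PORT A =====
-- the loop body of A: append the i-th forward diff and the i-th reversed diff
-- (revIdx = n - i - 1 is written inline)
def pvAStep (cs : List Char) (n : Int) (acc : List Int × List Int) (i : Int) : List Int × List Int :=
  (acc.1 ++ [|pvOrd (PySem.List.pyGetD cs i ' ') - pvOrd (PySem.List.pyGetD cs (i + 1) ' ')|],
   acc.2 ++ [|pvOrd (PySem.List.pyGetD cs (n - i - 1) ' ') - pvOrd (PySem.List.pyGetD cs (n - i - 1 - 1) ' ')|])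

def funnyString (s : String) : String :=
  if ((PySem.List.pyRange 0 ((s.toList.length : Int) - 1) 1).foldl
        (pvAStep s.toList (s.toList.length : Int)) ([], [])).2
     = ((PySem.List.pyRange 0 ((s.toList.length : Int) - 1) 1).foldl
        (pvAStep s.toList (s.toList.length : Int)) ([], [])).1
  then "Funny" else "Not Funny"

-- ===== PORT B =====
-- the early-returning loop of Source B as structural recursion over the index list
def pvAltGo (cs : List Char) (n : Int) : List Int → String
  | [] => "Funny"
  | i :: rest =>
      if |pvOrd (PySem.List.pyGetD cs i ' ') - pvOrd (PySem.List.pyGetD cs (i + 1) ' ')| ≠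
         |pvOrd (PySem.List.pyGetD cs (n - 1 - i) ' ') - pvOrd (PySem.List.pyGetD cs (n - 2 - i) ' ')| then
        "Not Funny"
      else pvAltGo cs n rest

def funnyString_alt (s : String) : String :=
  pvAltGo s.toList (s.toList.length : Int)
    (PySem.List.pyRange 0 (PySem.Int.floordiv ((s.toList.length : Int) - 1) 2) 1)

-- ===== PRECONDITION & SPEC =====
def Spec_funnyString (s : String) (out : String) : Prop := out = funnyString_alt s
instance (s : String) (out : String) : Decidable (Spec_funnyString s out) := by unfold Spec_funnyString; infer_instance

-- ===== CLAIM (what is proved, stated in full; the proofs are below) =====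
def Claim_equal_funnyString : Prop := ∀ (s : String), Dom_funnyString s → Spec_funnyString s (funnyString s)

-- ===== LEMMAS AND PROOFS =====

-- the i-th adjacent difference
def pvD (cs : List Char) (i : Int) : Int :=
  |pvOrd (PySem.List.pyGetD cs i ' ') - pvOrd (PySem.List.pyGetD cs (i + 1) ' ')|

lemma pvAFold (cs : List Char) (n : Int) (l : List Int) (a b : List Int) :
    l.foldl (pvAStep cs n) (a, b)
      = (a ++ l.map (fun i => pvD cs i),
         b ++ l.map (fun i => |pvOrd (PySem.List.pyGetD cs (n - i - 1) ' ') - pvOrd (PySem.List.pyGetD cs (n - i - 1 - 1) ' ')|)) := by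
  induction l generalizing a b with
  | nil => simp
  | cons x xs ih => simp [List.foldl_cons, pvAStep, ih, pvD]

lemma pvAltGo_funny_iff (cs : List Char) (n : Int) (l : List Int) :
    pvAltGo cs n l = "Funny" ↔ ∀ i ∈ l, pvD cs i = |pvOrd (PySem.List.pyGetD cs (n - 1 - i) ' ') - pvOrd (PySem.List.pyGetD cs (n - 2 - i) ' ')| := by
  induction l with
  | nil => simp [pvAltGo]
  | cons x xs ih =>
      by_cases h : |pvOrd (PySem.List.pyGetD cs x ' ') - pvOrd (PySem.List.pyGetD cs (x + 1) ' ')| =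
         |pvOrd (PySem.List.pyGetD cs (n - 1 - x) ' ') - pvOrd (PySem.List.pyGetD cs (n - 2 - x) ' ')|
      · rw [show pvAltGo cs n (x :: xs) = pvAltGo cs n xs from by simp [pvAltGo, h], ih]
        simp [pvD, h]
      · rw [show pvAltGo cs n (x :: xs) = "Not Funny" from by simp [pvAltGo, h]]
        simp only [List.mem_cons]
        constructor
        · intro hc; exact absurd hc (by decide)
        · intro hc
          have := hc x (Or.inl rfl)
          rw [pvD] at this
          exact absurd this h

lemma pvAltGo_cases (cs : List Char) (n : Int) (l : List Int) :
    pvAltGo cs n l = "Funny" ∨ pvAltGo cs n l = "Not Funny" := by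
  induction l with
  | nil => left; rfl
  | cons x xs ih =>
      simp only [pvAltGo]
      split
      · right; rfl
      · exact ih

lemma pvMapEq_iff (b : Int) (f g : Int → Int) :
    (PySem.List.pyRange 0 b 1).map f = (PySem.List.pyRange 0 b 1).map g ↔
      ∀ i : Int, 0 ≤ i → i < b → f i = g i := by
  constructor
  · intro h i h0 hb
    have hm : i ∈ PySem.List.pyRange 0 b 1 := by
      rw [PySem.List.mem_pyRange_one]; exact ⟨h0, hb⟩
    obtain ⟨k, hk, hik⟩ := List.mem_iff_getElem.mp hm
    have h1 := congrArg (fun xs => xs[k]?) h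
    simp only [List.getElem?_map] at h1
    rw [List.getElem?_eq_getElem hk, hik] at h1
    simpa using h1
  · intro h
    apply List.ext_getElem
    · simp
    · intro k h1 h2
      simp only [List.getElem_map, PySem.List.getElem_pyRange_one, zero_add]
      have hk : ((k : Int)) < b := by
        have := h1
        simp only [List.length_map, PySem.List.length_pyRange_one] at this
        omega
      exact h (k : Int) (by positivity) hk

-- the core symmetry argument: checking the first (n-1)//2 diff indices suffices
lemma pvHalf_suffices (cs : List Char) (n : Int) (hn : n = (cs.length : Int))
    (h : ∀ i : Int, 0 ≤ i → i < PySem.Int.floordiv (n - 1) 2 →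
      pvD cs i = |pvOrd (PySem.List.pyGetD cs (n - 1 - i) ' ') - pvOrd (PySem.List.pyGetD cs (n - 2 - i) ' ')|)
    (i : Int) (h0 : 0 ≤ i) (hb : i < n - 1) :
    pvD cs i = |pvOrd (PySem.List.pyGetD cs (n - 1 - i) ' ') - pvOrd (PySem.List.pyGetD cs (n - 2 - i) ' ')| := by
  have hfd : PySem.Int.floordiv (n - 1) 2 = (n - 1) / 2 :=
    PySem.Int.floordiv_eq_ediv_of_pos (by omega)
  rw [hfd] at h
  by_cases hi : i < (n - 1) / 2
  · exact h i h0 hi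
  · by_cases hji : n - 2 - i = i
    · -- middle diff index: its mirror is itself
      rw [show n - 1 - i = i + 1 by omega, hji, pvD]
      exact abs_sub_comm _ _
    · have hjlt : n - 2 - i < (n - 1) / 2 := by omega
      have hh := h (n - 2 - i) (by omega) hjlt
      rw [show n - 1 - (n - 2 - i) = i + 1 by ring, show n - 2 - (n - 2 - i) = i by ring] at hh
      have goalr : |pvOrd (PySem.List.pyGetD cs (n - 1 - i) ' ') - pvOrd (PySem.List.pyGetD cs (n - 2 - i) ' ')|
          = pvD cs (n - 2 - i) := by
        rw [pvD, abs_sub_comm, show n - 2 - i + 1 = n - 1 - i by ring]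
      rw [goalr, hh, pvD]
      exact abs_sub_comm _ _

-- A's comparison, rewritten through the map characterisation
lemma pvA_funny_iff (s : String) :
    funnyString s = "Funny" ↔
      ∀ i : Int, 0 ≤ i → i < (s.toList.length : Int) - 1 →
        pvD s.toList i = |pvOrd (PySem.List.pyGetD s.toList ((s.toList.length : Int) - 1 - i) ' ') - pvOrd (PySem.List.pyGetD s.toList ((s.toList.length : Int) - 2 - i) ' ')| := by
  unfold funnyString
  rw [pvAFold]
  simp only [List.nil_append]
  constructor
  · intro h
    split_ifs at h with hc
    · intro i h0 hb
      have := (pvMapEq_iff ((s.toList.length : Int) - 1) _ _).mp hc i h0 hb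
      rw [← this, show (s.toList.length : Int) - i - 1 = (s.toList.length : Int) - 1 - i by ring]
      rw [show (s.toList.length : Int) - 1 - i - 1 = (s.toList.length : Int) - 2 - i by ring]
    · exact absurd h (by decide)
  · intro h
    rw [if_pos]
    apply (pvMapEq_iff ((s.toList.length : Int) - 1) _ _).mpr
    intro i h0 hb
    rw [show (s.toList.length : Int) - i - 1 = (s.toList.length : Int) - 1 - i by ring,
        show (s.toList.length : Int) - 1 - i - 1 = (s.toList.length : Int) - 2 - i by ring]
    exact (h i h0 hb).symm

lemma pvB_funny_iff (s : String) :
    funnyString_alt s = "Funny" ↔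
      ∀ i : Int, 0 ≤ i → i < PySem.Int.floordiv ((s.toList.length : Int) - 1) 2 →
        pvD s.toList i = |pvOrd (PySem.List.pyGetD s.toList ((s.toList.length : Int) - 1 - i) ' ') - pvOrd (PySem.List.pyGetD s.toList ((s.toList.length : Int) - 2 - i) ' ')| := by
  unfold funnyString_alt
  rw [pvAltGo_funny_iff]
  constructor
  · intro h i h0 hb
    exact h i (by rw [PySem.List.mem_pyRange_one]; exact ⟨h0, hb⟩)
  · intro h i hi
    rw [PySem.List.mem_pyRange_one] at hi
    exact h i hi.1 hi.2

lemma pvA_cases (s : String) : funnyString s = "Funny" ∨ funnyString s = "Not Funny" := by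
  unfold funnyString
  split
  · left; rfl
  · right; rfl

lemma pvKey (s : String) : funnyString s = "Funny" ↔ funnyString_alt s = "Funny" := by
  rw [pvA_funny_iff, pvB_funny_iff]
  constructor
  · intro h i h0 hb
    apply h i h0
    rw [PySem.Int.floordiv_eq_ediv_of_pos (by omega : (0:Int) < 2)] at hb
    omega
  · intro h
    exact pvHalf_suffices s.toList _ rfl h

-- ===== VERDICT (by name: the statement is the Claim_ definition above) =====
theorem funnyString_spec : Claim_equal_funnyString := by
  intro s _
  unfold Spec_funnyString
  rcases pvA_cases s with hA | hA
  · rw [hA, (pvKey s).mp hA]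
  · rcases pvAltGo_cases s.toList (s.toList.length : Int)
      (PySem.List.pyRange 0 (PySem.Int.floordiv ((s.toList.length : Int) - 1) 2) 1) with hB | hB
    · have : funnyString_alt s = "Funny" := hB
      rw [(pvKey s).mpr this] at hA
      exact absurd hA (by decide)
    · rw [hA]
      exact hB.symm
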